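-- pv_equiv track=rewrite | github.com/17tangs/schedule-python | scraper.py | joinMajor
-- ===== SOURCE A (Python) =====
-- def hasNumbers(inputString):
--      return any(char.isdigit() for char in inputString)
--
-- def joinMajor(char, l):
--     i = 0
--     while i < len(l)-1:
--         if i>len(l)-1:
--             break
--         words = [c for c in l[i].split(' ') if c != '']
--         if words[len(words)-1][0].isupper() and not hasNumbers(words[len(words)-1]):
--             l[i] = char.join([l[i], l[i+1]])
--             l.remove(l[i+1])
--             i -= 1
--         i += 1
--     return l
-- ===== SOURCE B (Python) =====
-- def hasNumbers(inputString):
--      return any(char.isdigit() for char in inputString)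
--
-- def _mergeable(s):
--     words = [c for c in s.split(' ') if c != '']
--     return bool(words) and words[-1][0].isupper() and not hasNumbers(words[-1])
--
-- def joinMajor(char, l):
--     out = []
--     for x in l:
--         if out and _mergeable(out[-1]):
--             out[-1] = char.join([out[-1], x])
--         else:
--             out.append(x)
--     l[:] = out
--     return l
-- ===== Notes on version B (the rewrite author's own statement) =====
-- stated objective: alternative
-- what changed: A repeatedly rescans and mutates the list in place (index bookkeeping plus list.remove, which itself scans from the front) while B does one left-to-right pass appending to a result list and merging each element into the last kept one; intended as faster on merge-heavy inputs (A is quadratic there), measured only ~1.35x on the generated inputs.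
-- outside the precondition, e.g. on joinMajor(' ', ['A', 'b1', 'C', 'A b1']): A returns ['C A b1', 'A b1'], B returns ['A b1', 'C A b1']; on joinMajor('-', ['x', 'A', 'x']): A returns ['A-x', 'x'], B returns ['x', 'A-x']; on joinMajor('-', ['A', '  ', 'x']): A returns ['A-  -x'], B returns ['A-  -x']
import Mathlib
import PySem

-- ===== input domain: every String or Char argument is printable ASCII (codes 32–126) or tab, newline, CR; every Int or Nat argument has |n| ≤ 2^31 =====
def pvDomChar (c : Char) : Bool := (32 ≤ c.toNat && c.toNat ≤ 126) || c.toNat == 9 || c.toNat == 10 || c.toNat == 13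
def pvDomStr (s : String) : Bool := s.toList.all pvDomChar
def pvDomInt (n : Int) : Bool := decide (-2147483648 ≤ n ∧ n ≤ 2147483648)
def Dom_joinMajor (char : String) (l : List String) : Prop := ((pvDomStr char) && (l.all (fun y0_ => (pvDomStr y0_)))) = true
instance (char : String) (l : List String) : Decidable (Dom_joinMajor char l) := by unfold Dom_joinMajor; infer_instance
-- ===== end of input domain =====

-- B replaces A's index-juggling while-loop with list.remove by a single left-to-right pass that
-- merges each element into the last kept one (equivalence is about the RETURN value; both A and B
-- leave the same final content in the argument list).

-- ===== PORT A =====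

-- any(char.isdigit() for char in inputString)
def pvHasNumbers (s : String) : Bool := s.toList.any PySem.Chars.isdigit

-- [c for c in s.split(' ') if c != '']   (sep is the literal " " ≠ "", so split? is always some)
def pvWords (s : String) : List String :=
  ((PySem.Str.split? s " ").getD []).filter (fun c => c ≠ "")

def joinMajorLoop (char : String) (l : List String) (i : Int) : List String :=
  if _hg : i < (l.length : Int) - 1 then
    if (l.length : Int) - 1 < i then l       -- if i>len(l)-1: break
    else
      match PySem.List.pyGet? l i with
      | none => l                            -- IndexError (unreachable: 0 ≤ i < len under the guard)
      | some li =>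
        let words := pvWords li
        match PySem.List.pyGet? words ((words.length : Int) - 1) with
        | none => l                          -- IndexError: words == [] (whitespace-only element); excluded by Pre_
        | some w =>
          if (match PySem.Str.pyGet? w 0 with
              | some c => PySem.Chars.isupper c
              | none => false) && !pvHasNumbers w then
            match PySem.List.pyGet? l (i + 1) with
            | none => l                      -- IndexError (unreachable under the guard)
            | some li1 =>
              let l1 := PySem.List.pySetD l i (PySem.Str.join char [li, li1])
              match _hr : PySem.List.remove? l1 li1 with
              | none => l1                   -- ValueError (unreachable: li1 ∈ l1)
              | some l2 => joinMajorLoop char l2 (i - 1 + 1)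
          else joinMajorLoop char l (i + 1)
  else l
termination_by (2 * (l.length : Int) - i).toNat
decreasing_by
  · have hmem : li1 ∈ l1 := by
      by_contra hni
      simp [(PySem.List.remove?_eq_none_iff l1 li1).mpr hni] at _hr
    have h2 : l2 = l1.erase li1 := by
      rw [PySem.List.remove?_eq_some_erase l1 li1 hmem] at _hr
      exact (Option.some.inj _hr).symm
    have hlen2 : l2.length = l1.length - 1 := by rw [h2]; exact List.length_erase_of_mem hmem
    have hpos : 1 ≤ l1.length := List.length_pos_of_mem hmem
    have hlen1 : l1.length = l.length := PySem.List.length_pySetD l i _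
    omega
  · omega

def joinMajor (char : String) (l : List String) : List String := joinMajorLoop char l 0

-- ===== PORT B =====

-- bool(words) and words[-1][0].isupper() and not hasNumbers(words[-1])
def pvMergeable (s : String) : Bool :=
  let words := pvWords s
  !words.isEmpty &&
    (match PySem.List.pyGet? words (-1) with
     | some w =>
       (match PySem.Str.pyGet? w 0 with
        | some c => PySem.Chars.isupper c
        | none => false) && !pvHasNumbers w
     | none => false)

def joinMajor_alt (char : String) (l : List String) : List String :=
  l.foldl (fun out x =>
    match out.getLast? with
    | some last =>
      if pvMergeable last then out.dropLast ++ [PySem.Str.join char [last, x]]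
      else out ++ [x]
    | none => out ++ [x]) []

-- ===== PRECONDITION & SPEC =====

-- Pre_ admits lists in which no element can trigger a merge (A only walks the list), and lists
-- that merge safely. It excludes (a) whitespace-only non-final elements, on which A raises
-- IndexError; (b) merge-triggering lists with duplicate elements and (c) merge-triggering lists
-- containing the char-join of one of their own contiguous runs of ≥ 2 elements, on which A's
-- remove-by-VALUE deletes an accidental earlier duplicate instead of the element it just merged,
-- an artefact of A's implementation.
def Pre_joinMajor (char : String) (l : List String) : Prop :=
  (∀ s ∈ l.dropLast, pvWords s ≠ [] ∧ pvMergeable s = false) ∨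
  (l.Nodup ∧
   (∀ s ∈ l.dropLast, s.toList.any (fun c => c ≠ ' ') = true) ∧
   (∀ t ∈ l.tails, ∀ p ∈ t.inits, 2 ≤ p.length → PySem.Str.join char p ∉ l))
instance (char : String) (l : List String) : Decidable (Pre_joinMajor char l) := by
  unfold Pre_joinMajor; infer_instance

def pvWitness_joinMajor : String × List String := ("-", ["Ab", "cd"])

def Spec_joinMajor (char : String) (l : List String) (out : List String) : Prop :=
  out = joinMajor_alt char l
instance (char : String) (l : List String) (out : List String) : Decidable (Spec_joinMajor char l out) := by
  unfold Spec_joinMajor; infer_instance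

-- ===== CLAIM (what is proved, stated in full; the proofs are below) =====
def Claim_equal_joinMajor : Prop := ∀ (char : String) (l : List String), Dom_joinMajor char l → Pre_joinMajor char l → Spec_joinMajor char l (joinMajor char l)


-- ===== LEMMAS AND PROOFS =====

-- B's merge chain, written as a recursion on the not-yet-processed suffix with the current
-- last kept element as accumulator (proof-side view of B's fold).
def pvGB (char : String) (cur : String) (rest : List String) : List String :=
  match rest with
  | [] => [cur]
  | x :: xs =>
    if pvMergeable cur then pvGB char (PySem.Str.join char [cur, x]) xs
    else cur :: pvGB char x xs

lemma pvFoldB_eq (char : String) (xs : List String) :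
    ∀ (acc : List String) (cur : String),
    xs.foldl (fun out x =>
      match out.getLast? with
      | some last =>
        if pvMergeable last then out.dropLast ++ [PySem.Str.join char [last, x]]
        else out ++ [x]
      | none => out ++ [x]) (acc ++ [cur]) = acc ++ pvGB char cur xs := by
  induction xs with
  | nil => intro acc cur; simp [pvGB]
  | cons x rest ih =>
    intro acc cur
    rw [List.foldl_cons]
    have hl : (acc ++ [cur]).getLast? = some cur := by simp
    rw [pvGB]
    by_cases hm : pvMergeable cur
    · simp only [hl, hm, if_true, List.dropLast_concat]
      rw [ih acc (PySem.Str.join char [cur, x])]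
    · simp only [hl, hm, if_false, Bool.false_eq_true]
      rw [show acc ++ [cur] ++ [x] = (acc ++ [cur]) ++ [x] by simp,
        ih (acc ++ [cur]) x]
      simp

lemma pvJoin_singleton (char : String) (x : String) :
    PySem.Str.join char [x] = x := by
  apply String.toList_inj.mp
  simp [PySem.Str.toList_join, PySem.Chars.join_singleton]

lemma chars_join_join (sep : List Char) (r : List Char) :
    ∀ C : List (List Char), C ≠ [] →
    PySem.Chars.join sep [PySem.Chars.join sep C, r] = PySem.Chars.join sep (C ++ [r])
  | [], h => absurd rfl h
  | [c], _ => by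
      simp [PySem.Chars.join_singleton, PySem.Chars.join_cons_cons]
  | c :: c' :: rest, _ => by
      have ih := chars_join_join sep r (c' :: rest) (by simp)
      have e1 : ∀ a b : List Char, PySem.Chars.join sep [a, b] = a ++ sep ++ b := fun a b => by
        rw [PySem.Chars.join_cons_cons, PySem.Chars.join_singleton]
      have ih' : PySem.Chars.join sep (c' :: (rest ++ [r]))
          = PySem.Chars.join sep (c' :: rest) ++ sep ++ r := by
        rw [← List.cons_append, ← ih, e1]
      rw [e1, PySem.Chars.join_cons_cons,
        show (c :: c' :: rest) ++ [r] = c :: c' :: (rest ++ [r]) by simp,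
        PySem.Chars.join_cons_cons, ih']
      simp [List.append_assoc]

lemma pvJoin_join (char : String) (C : List String) (r : String) (hC : C ≠ []) :
    PySem.Str.join char [PySem.Str.join char C, r] = PySem.Str.join char (C ++ [r]) := by
  apply String.toList_inj.mp
  simp only [PySem.Str.toList_join, List.map_cons, List.map_nil, List.map_append,
    PySem.Str.toList_join]
  exact chars_join_join char.toList r.toList (C.map String.toList) (by simpa using hC)

lemma pvJoin_any (char : String) (c₀ : String) (C : List String)
    (h : c₀.toList.any (fun c => c ≠ ' ') = true) :
    (PySem.Str.join char (c₀ :: C)).toList.any (fun c => c ≠ ' ') = true := by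
  rw [PySem.Str.toList_join]
  cases C with
  | nil => simpa [PySem.Chars.join_singleton] using h
  | cons b bs =>
    rw [List.map_cons, List.map_cons, PySem.Chars.join_cons_cons]
    simp only [List.any_append, h, Bool.true_or]

lemma pvGo_any (fuel : Nat) :
    ∀ (l cur : List Char) (acc : List (List Char)), l.length < fuel →
    ((PySem.Chars.splitOn.go [' '] fuel l cur acc).any (fun p => !p.isEmpty)
      = (acc.any (fun p => !p.isEmpty) || !cur.isEmpty || l.any (fun c => c ≠ ' '))) := by
  induction fuel with
  | zero => intro l cur acc h; omega
  | succ fuel ih =>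
    intro l cur acc h
    cases l with
    | nil =>
      rw [PySem.Chars.splitOn.go.eq_def]
      simp
    | cons c rest =>
      rw [PySem.Chars.splitOn.go.eq_def]
      simp only [List.isPrefixOf]
      by_cases hc : c = ' '
      · subst hc
        simp only [beq_self_eq_true, Bool.true_and, if_true]
        rw [show List.drop [' '].length (' ' :: rest) = rest from rfl]
        rw [ih rest [] (cur.reverse :: acc) (by simpa using h)]
        simp [Bool.or_comm, Bool.or_left_comm]
      · have hcf : (' ' == c && true) = false := by simp [Ne.symm hc]
        simp only [hcf]
        simp only [Bool.false_eq_true, if_false]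
        rw [ih rest (c :: cur) acc (by simpa using h)]
        simp [hc, Bool.or_comm]

lemma pvWords_ne_nil (s : String) (h : s.toList.any (fun c => c ≠ ' ') = true) :
    pvWords s ≠ [] := by
  unfold pvWords
  have hsp : PySem.Str.split? s " " =
      some ((PySem.Chars.splitOn s.toList [' ']).map String.ofList) := by
    rw [PySem.Str.split?]
    simp [PySem.Chars.split?, show (" ".toList) = [' '] from rfl]
  rw [hsp]
  simp only [Option.getD_some]
  intro hempty
  have hall : ∀ p ∈ (PySem.Chars.splitOn s.toList [' ']).map String.ofList, p = "" := by
    have h2 := List.filter_eq_nil_iff.mp hempty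
    intro p hp
    have h3 := h2 p hp
    simpa using h3
  have hany : ((PySem.Chars.splitOn s.toList [' ']).any (fun p => !p.isEmpty)) = true := by
    have hgo := pvGo_any (s.toList.length + 1) s.toList [] [] (by omega)
    rw [PySem.Chars.splitOn, hgo]
    simpa using h
  rw [List.any_eq_true] at hany
  obtain ⟨p, hp, hne⟩ := hany
  have hz := hall (String.ofList p) (List.mem_map_of_mem hp)
  have hpnil : p = [] := by
    have := congrArg String.toList hz
    simpa using this
  simp [hpnil] at hne

lemma pvRemove_append (v : String) (pre suf : List String) (hv : v ∉ pre) :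
    PySem.List.remove? (pre ++ v :: suf) v = some (pre ++ suf) := by
  induction pre with
  | nil => simp
  | cons a t ih =>
    have ha : a ≠ v := by rintro rfl; exact hv (List.mem_cons_self)
    rw [List.cons_append, PySem.List.remove?_cons_of_ne _ ha, ih (fun hm => hv (List.mem_cons_of_mem _ hm))]
    simp

lemma pvSet_append (pre suf : List String) (b v : String) :
    (pre ++ b :: suf).set pre.length v = pre ++ v :: suf := by
  induction pre with
  | nil => simp
  | cons a t ih => simp [ih]

-- the last word exists, and A's inline condition on it is B's pvMergeable
lemma pvCond_eq (s w : String) (hwne : pvWords s ≠ []) (hw : (pvWords s).getLast? = some w) :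
    PySem.List.pyGet? (pvWords s) (((pvWords s).length : Int) - 1) = some w ∧
    pvMergeable s = ((match PySem.Str.pyGet? w 0 with
      | some c => PySem.Chars.isupper c
      | none => false) && !pvHasNumbers w) := by
  constructor
  · have hpos : 1 ≤ (pvWords s).length := List.length_pos_of_ne_nil hwne
    have hcast : (((pvWords s).length : Int) - 1) = (((pvWords s).length - 1 : Nat) : Int) := by omega
    rw [hcast, PySem.List.pyGet?_natCast, ← List.getLast?_eq_getElem?]
    exact hw
  · unfold pvMergeable
    simp only [PySem.List.pyGet?_neg_one, hw]
    simp [hwne]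

lemma pvGetLast_ex (ws : List String) (h : ws ≠ []) : ∃ w, ws.getLast? = some w := by
  cases hx : ws.getLast? with
  | none => exact absurd (List.getLast?_eq_none_iff.mp hx) h
  | some w => exact ⟨w, rfl⟩

-- when no element that A examines can trigger a merge, A's loop only walks the list
lemma pvLoop_noMerge (char : String) (l₀ : List String)
    (hok : ∀ s ∈ l₀.dropLast, pvWords s ≠ [] ∧ pvMergeable s = false) :
    ∀ (rest pre : List String), l₀ = pre ++ rest →
    joinMajorLoop char l₀ (pre.length : Int) = l₀ := by
  intro rest
  induction rest with
  | nil =>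
    intro pre hdec
    rw [joinMajorLoop, dif_neg (by rw [hdec]; simp)]
  | cons r rest' ih =>
    intro pre hdec
    cases rest' with
    | nil => rw [joinMajorLoop, dif_neg (by rw [hdec]; simp)]
    | cons r2 rest'' =>
      have hr : r ∈ l₀.dropLast := by
        rw [hdec, show pre ++ r :: r2 :: rest'' = (pre ++ [r]) ++ (r2 :: rest'') by simp,
          List.dropLast_append_of_ne_nil (by simp)]
        simp
      obtain ⟨hwne, hmf⟩ := hok r hr
      obtain ⟨w, hw⟩ := pvGetLast_ex _ hwne
      obtain ⟨h2, hm_eq⟩ := pvCond_eq r w hwne hw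
      rw [joinMajorLoop]
      rw [dif_pos (by rw [hdec]; simp; omega)]
      rw [if_neg (by rw [hdec]; simp; omega)]
      have h1 : PySem.List.pyGet? l₀ ((pre.length : Int)) = some r := by
        rw [hdec]; exact PySem.List.pyGet?_append_length pre _ r
      rw [h1]
      simp only []
      rw [h2]
      simp only []
      rw [if_neg (by rw [← hm_eq, hmf]; simp)]
      rw [show ((pre.length : Int) + 1) = (((pre ++ [r]).length : Nat) : Int) by simp]
      exact ih (pre ++ [r]) (by simp [hdec])

-- B's merge chain on a merge-free list only copies it
lemma pvGB_noMerge (char : String) :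
    ∀ (rest : List String) (cur : String),
    (∀ s ∈ (cur :: rest).dropLast, pvMergeable s = false) →
    pvGB char cur rest = cur :: rest := by
  intro rest
  induction rest with
  | nil => intro cur _; rfl
  | cons r rest' ih =>
    intro cur hok
    rw [pvGB, if_neg (by rw [hok cur (by simp)]; simp)]
    rw [ih r (fun s hs => hok s (by
      rcases rest' with _ | ⟨a, b⟩
      · simp at hs
      · simp at hs ⊢; tauto))]

lemma pvLoop_eq (char : String) (l₀ : List String)
    (hnd : l₀.Nodup)
    (hws : ∀ s ∈ l₀.dropLast, s.toList.any (fun c => c ≠ ' ') = true)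
    (hruns : ∀ t ∈ l₀.tails, ∀ p ∈ t.inits, 2 ≤ p.length → PySem.Str.join char p ∉ l₀) :
    ∀ (rest : List String) (Rs : List (List String)) (C : List String),
    l₀ = Rs.flatten ++ (C ++ rest) → C ≠ [] → (∀ R ∈ Rs, R ≠ []) →
    (∀ R ∈ Rs, pvMergeable (PySem.Str.join char R) = false) →
    joinMajorLoop char (Rs.map (PySem.Str.join char) ++ PySem.Str.join char C :: rest) (Rs.length : Int)
      = Rs.map (PySem.Str.join char) ++ pvGB char (PySem.Str.join char C) rest := by
  intro rest
  induction rest with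
  | nil =>
    intro Rs C hdec hC hRs hconds
    rw [joinMajorLoop]
    rw [dif_neg (by simp)]
    rfl
  | cons r rest' ih =>
    intro Rs C hdec hC hRs hconds
    -- abbreviations
    have hinfix : ∀ p : List String, 2 ≤ p.length → p <:+: l₀ → PySem.Str.join char p ∉ l₀ := by
      intro p hlen hinf
      obtain ⟨u, v, huv⟩ := hinf
      exact hruns (p ++ v) ((List.mem_tails _ _).mpr ⟨u, by rw [← huv]; simp⟩)
        p ((List.mem_inits _ _).mpr ⟨v, rfl⟩) hlen
    have hrmem : r ∈ l₀ := by rw [hdec]; simp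
    have hrnotpre : r ∉ Rs.flatten ++ C := by
      have hnd' : ((Rs.flatten ++ C) ++ r :: rest').Nodup := by
        rw [hdec] at hnd; simpa [List.append_assoc] using hnd
      have hdisj := (List.nodup_append.mp hnd').2.2
      intro hmem
      exact hdisj r hmem r (List.mem_cons_self) rfl
    -- the current element has a word
    obtain ⟨c₀, Ctl, rfl⟩ : ∃ c₀ Ctl, C = c₀ :: Ctl := by
      cases C with
      | nil => exact absurd rfl hC
      | cons a b => exact ⟨a, b, rfl⟩
    have hc₀ : c₀.toList.any (fun c => c ≠ ' ') = true := by
      apply hws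
      have : l₀.dropLast = (Rs.flatten ++ (c₀ :: Ctl)) ++ (r :: rest').dropLast := by
        rw [hdec, ← List.append_assoc]
        exact List.dropLast_append_of_ne_nil (by simp)
      rw [this]; simp
    have hwne : pvWords (PySem.Str.join char (c₀ :: Ctl)) ≠ [] :=
      pvWords_ne_nil _ (pvJoin_any char c₀ Ctl hc₀)
    obtain ⟨w, hw⟩ := pvGetLast_ex _ hwne
    obtain ⟨h2, hm_eq⟩ := pvCond_eq _ w hwne hw
    -- loop unfolding facts
    have hlen : (Rs.map (PySem.Str.join char) ++ PySem.Str.join char (c₀ :: Ctl) :: r :: rest').length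
        = Rs.length + 2 + rest'.length := by simp; omega
    rw [joinMajorLoop]
    rw [dif_pos (by rw [hlen]; push_cast; omega)]
    rw [if_neg (by rw [hlen]; push_cast; omega)]
    have h1 : PySem.List.pyGet? (Rs.map (PySem.Str.join char) ++ PySem.Str.join char (c₀ :: Ctl) :: r :: rest')
        ((Rs.length : Int)) = some (PySem.Str.join char (c₀ :: Ctl)) := by
      have := PySem.List.pyGet?_append_length (Rs.map (PySem.Str.join char)) (r :: rest') (PySem.Str.join char (c₀ :: Ctl))
      simpa using this
    rw [h1]
    simp only []
    rw [h2]
    simp only []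
    by_cases hm : pvMergeable (PySem.Str.join char (c₀ :: Ctl)) = true
    · -- merge step
      rw [hm_eq] at hm
      rw [if_pos hm]
      have h4 : PySem.List.pyGet? (Rs.map (PySem.Str.join char) ++ PySem.Str.join char (c₀ :: Ctl) :: r :: rest')
          ((Rs.length : Int) + 1) = some r := by
        have := PySem.List.pyGet?_append_length
          (Rs.map (PySem.Str.join char) ++ [PySem.Str.join char (c₀ :: Ctl)]) rest' r
        simp only [List.length_append, List.length_map, List.length_cons] at this
        push_cast at this ⊢
        simpa [List.append_assoc] using this
      rw [h4]
      simp only []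
      have hjj : PySem.Str.join char [PySem.Str.join char (c₀ :: Ctl), r]
          = PySem.Str.join char ((c₀ :: Ctl) ++ [r]) := pvJoin_join char _ r (by simp)
      have hset : PySem.List.pySetD (Rs.map (PySem.Str.join char) ++ PySem.Str.join char (c₀ :: Ctl) :: r :: rest')
          ((Rs.length : Int)) (PySem.Str.join char [PySem.Str.join char (c₀ :: Ctl), r])
          = Rs.map (PySem.Str.join char) ++ PySem.Str.join char ((c₀ :: Ctl) ++ [r]) :: r :: rest' := by
        rw [PySem.List.pySetD_natCast, hjj]
        have := pvSet_append (Rs.map (PySem.Str.join char)) (r :: rest')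
          (PySem.Str.join char (c₀ :: Ctl)) (PySem.Str.join char ((c₀ :: Ctl) ++ [r]))
        simpa using this
      rw [hset]
      have hnotin : r ∉ Rs.map (PySem.Str.join char) ++ [PySem.Str.join char ((c₀ :: Ctl) ++ [r])] := by
        intro hmem
        rcases List.mem_append.mp hmem with hmem | hmem
        · -- r equal to a settled merged element
          obtain ⟨R, hR, hJR⟩ := List.mem_map.mp hmem
          rcases R with _ | ⟨x, Rtl⟩
          · exact hRs [] hR rfl
          rcases Rtl with _ | ⟨y, Rtl⟩
          · -- singleton run: an original element left of r
            rw [pvJoin_singleton] at hJR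
            apply hrnotpre
            apply List.mem_append_left
            rw [← hJR]
            exact List.mem_flatten.mpr ⟨[x], hR, by simp⟩
          · -- run of length ≥ 2: its join is not in l₀ at all
            have hinf : (x :: y :: Rtl) <:+: l₀ := by
              obtain ⟨pre, suf, hps⟩ := List.mem_iff_append.mp hR
              refine ⟨pre.flatten, suf.flatten ++ ((c₀ :: Ctl) ++ (r :: rest')), ?_⟩
              rw [hdec, hps]
              simp [List.flatten_append, List.append_assoc]
            exact hinfix _ (by simp) hinf (hJR ▸ hrmem)
        · -- r equal to the just-merged join
          have hinf : ((c₀ :: Ctl) ++ [r]) <:+: l₀ := by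
            refine ⟨Rs.flatten, rest', ?_⟩
            rw [hdec]
            simp [List.append_assoc]
          have := hinfix _ (by simp) hinf
          simp only [List.mem_singleton] at hmem
          exact this (hmem ▸ hrmem)
      have hrem : PySem.List.remove?
          (Rs.map (PySem.Str.join char) ++ PySem.Str.join char ((c₀ :: Ctl) ++ [r]) :: r :: rest') r
          = some (Rs.map (PySem.Str.join char) ++ PySem.Str.join char ((c₀ :: Ctl) ++ [r]) :: rest') := by
        have := pvRemove_append r
          (Rs.map (PySem.Str.join char) ++ [PySem.Str.join char ((c₀ :: Ctl) ++ [r])]) rest' hnotin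
        simpa [List.append_assoc] using this
      rw [hrem]
      simp only []
      rw [show ((Rs.length : Int) - 1 + 1) = (Rs.length : Int) by ring]
      rw [ih Rs ((c₀ :: Ctl) ++ [r]) (by rw [hdec]; simp [List.append_assoc]) (by simp) hRs hconds]
      rw [pvGB]
      rw [if_pos (by rw [hm_eq]; exact hm), hjj]
    · -- no merge: advance
      rw [hm_eq] at hm
      rw [if_neg hm]
      have hJr : PySem.Str.join char [r] = r := pvJoin_singleton char r
      have hlist : Rs.map (PySem.Str.join char) ++ PySem.Str.join char (c₀ :: Ctl) :: r :: rest'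
          = (Rs ++ [c₀ :: Ctl]).map (PySem.Str.join char) ++ PySem.Str.join char [r] :: rest' := by
        simp [hJr]
      have hidx : ((Rs.length : Int) + 1) = (((Rs ++ [c₀ :: Ctl]).length : Nat) : Int) := by
        simp
      rw [hlist, hidx]
      rw [ih (Rs ++ [c₀ :: Ctl]) [r]
        (by rw [hdec]; simp [List.append_assoc])
        (by simp)
        (by intro R hR; rcases List.mem_append.mp hR with h | h
            · exact hRs R h
            · simp only [List.mem_singleton] at h; subst h; simp)
        (by intro R hR; rcases List.mem_append.mp hR with h | h
            · exact hconds R h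
            · simp only [List.mem_singleton] at h; subst h
              rw [hm_eq]; simpa using hm)]
      rw [pvGB]
      rw [if_neg (by rw [hm_eq]; simpa using hm)]
      simp [hJr]
-- ===== VERDICT (by name: the statement is the Claim_ definition above) =====
theorem joinMajor_spec : Claim_equal_joinMajor := by
  unfold Claim_equal_joinMajor
  intro char l _hdom hpre
  unfold Spec_joinMajor
  cases l with
  | nil =>
    rw [joinMajor, joinMajorLoop]
    rw [dif_neg (by simp)]
    rfl
  | cons x xs =>
    rcases hpre with hnm | ⟨hnd, hws, hruns⟩
    · -- no element A examines can trigger a merge: both sides return the list unchanged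
      have hA : joinMajor char (x :: xs) = x :: xs := by
        rw [joinMajor]
        have := pvLoop_noMerge char (x :: xs) hnm (x :: xs) [] rfl
        simpa using this
      have hB : joinMajor_alt char (x :: xs) = x :: xs := by
        rw [joinMajor_alt, List.foldl_cons]
        have hfold := pvFoldB_eq char xs [] x
        simp only [List.nil_append] at hfold
        rw [show (match ([] : List String).getLast? with
          | some last =>
            if pvMergeable last then ([] : List String).dropLast ++ [PySem.Str.join char [last, x]]
            else [] ++ [x]
          | none => [] ++ [x]) = [x] from rfl, hfold,
          pvGB_noMerge char xs x (fun s hs => (hnm s hs).2)]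
      rw [hA, hB]
    · have hmain := pvLoop_eq char (x :: xs) hnd hws hruns xs [] [x]
        (by simp) (by simp) (by simp) (by simp)
      have hx : PySem.Str.join char [x] = x := pvJoin_singleton char x
      simp only [List.map_nil, List.nil_append, hx, List.length_nil, Nat.cast_zero] at hmain
      rw [joinMajor, hmain, joinMajor_alt, List.foldl_cons]
      have := pvFoldB_eq char xs [] x
      simpa using this.symm
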